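-- pv_equiv track=rewrite | github.com/Dhiora/Dhiora-management-backend | app/api/v1/ai_classroom/service.py | limit_context
-- ===== SOURCE A (Python) =====
-- from typing import AsyncGenerator, Iterable, List, Optional, Tuple
--
-- _CONTEXT_MAX_CHARS = 2000  # ~500 tokens — covers 3-4 relevant chunks comfortably
--
-- def limit_context(chunks: List[str], max_chars: int = _CONTEXT_MAX_CHARS) -> str:
--     """Join chunks up to max_chars. Keeps the most relevant (top-ranked) chunks first."""
--     result, total = [], 0
--     for chunk in chunks:
--         if total + len(chunk) > max_chars:
--             break
--         result.append(chunk)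
--         total += len(chunk)
--     return "\n\n".join(result)
-- ===== SOURCE B (Python) =====
-- _CONTEXT_MAX_CHARS = 2000  # ~500 tokens — covers 3-4 relevant chunks comfortably
--
-- def limit_context(chunks, max_chars=_CONTEXT_MAX_CHARS):
--     """Build a prefix-sum table of the chunk lengths, binary-search it (the sums
--     are nondecreasing) for the number of chunks that fit, slice and join."""
--     prefix = []
--     total = 0
--     for c in chunks:
--         total += len(c)
--         prefix.append(total)
--     lo, hi = 0, len(prefix)
--     while lo < hi:
--         mid = (lo + hi) // 2
--         if prefix[mid] <= max_chars:
--             lo = mid + 1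
--         else:
--             hi = mid
--     return "\n\n".join(chunks[:lo])
-- ===== Notes on version B (the rewrite author's own statement) =====
-- stated objective: alternative
-- what changed: B builds a prefix-sum table of the chunk lengths and binary-searches it (the sums are nondecreasing) for the number of chunks that fit, then slices and joins; A keeps a running total and breaks out of a single scan.
import Mathlib
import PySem

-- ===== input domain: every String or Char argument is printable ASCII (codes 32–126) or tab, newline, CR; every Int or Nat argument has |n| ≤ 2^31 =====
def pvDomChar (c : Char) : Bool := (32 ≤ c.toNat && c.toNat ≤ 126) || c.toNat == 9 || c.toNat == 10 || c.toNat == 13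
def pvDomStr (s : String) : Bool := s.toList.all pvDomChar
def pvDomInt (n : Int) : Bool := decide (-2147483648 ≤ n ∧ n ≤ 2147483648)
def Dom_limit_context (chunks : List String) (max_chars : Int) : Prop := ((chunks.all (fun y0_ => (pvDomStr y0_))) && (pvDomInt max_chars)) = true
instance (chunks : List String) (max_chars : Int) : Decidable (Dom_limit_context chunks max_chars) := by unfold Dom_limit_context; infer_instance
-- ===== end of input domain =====

-- B replaces A's running-total early-break scan by a prefix-sum table that is binary-searched
-- for the number of chunks that fit (alternative algorithm, same values).

-- ===== PORT A =====
-- A's loop: accumulate kept chunks while the running total stays within max_chars, break otherwise.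
def limitLoopA (max_chars : Int) : List String → Int → List String
  | [], _ => []
  | c :: rest, total =>
    if total + (PySem.Str.len c : Int) > max_chars then []
    else c :: limitLoopA max_chars rest (total + (PySem.Str.len c : Int))

def limit_context (chunks : List String) (max_chars : Int) : String :=
  PySem.Str.join "\n\n" (limitLoopA max_chars chunks 0)

-- ===== PORT B =====
-- Source B's first loop: build the prefix-sum table of the chunk lengths (running `total`).
def prefixAcc : List String → Int → List Int
  | [], _ => []
  | c :: rest, total =>
    (total + (PySem.Str.len c : Int)) :: prefixAcc rest (total + (PySem.Str.len c : Int))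

-- Source B's while-loop: binary search; `pre[mid]` is always in range (mid < hi ≤ len), so getD is
-- exact; the fuel argument only bounds the iteration count (hi - lo shrinks each step), it never
-- changes the computed value.
def bsearchGo (pre : List Int) (m : Int) : Nat → Nat → Nat → Nat
  | 0, lo, _ => lo
  | fuel + 1, lo, hi =>
    if lo < hi then
      let mid := (lo + hi) / 2
      if pre.getD mid 0 ≤ m then bsearchGo pre m fuel (mid + 1) hi
      else bsearchGo pre m fuel lo mid
    else lo

def bsearchB (pre : List Int) (m : Int) (lo hi : Nat) : Nat :=
  bsearchGo pre m (hi - lo) lo hi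

-- chunks[:lo] with lo : Nat is exactly List.take lo.
def limit_context_alt (chunks : List String) (max_chars : Int) : String :=
  let pre := prefixAcc chunks 0
  let lo := bsearchB pre max_chars 0 pre.length
  PySem.Str.join "\n\n" (chunks.take lo)

-- ===== PRECONDITION & SPEC =====
def Spec_limit_context (chunks : List String) (max_chars : Int) (out : String) : Prop := out = limit_context_alt chunks max_chars
instance (chunks : List String) (max_chars : Int) (out : String) : Decidable (Spec_limit_context chunks max_chars out) := by unfold Spec_limit_context; infer_instance

-- ===== CLAIM (what is proved, stated in full; the proofs are below) =====
def Claim_equal_limit_context : Prop := ∀ (chunks : List String) (max_chars : Int), Dom_limit_context chunks max_chars → Spec_limit_context chunks max_chars (limit_context chunks max_chars)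

-- ===== LEMMAS AND PROOFS =====

-- A's loop takes exactly the prefix of chunks whose prefix sums stay ≤ max_chars.
theorem limitLoopA_eq_take (m : Int) (chunks : List String) (total : Int) :
    limitLoopA m chunks total =
      chunks.take ((prefixAcc chunks total).takeWhile (fun x => x ≤ m)).length := by
  induction chunks generalizing total with
  | nil => simp [limitLoopA, prefixAcc]
  | cons c rest ih =>
    simp only [limitLoopA, prefixAcc, List.takeWhile_cons, decide_eq_true_eq]
    by_cases h : total + (PySem.Str.len c : Int) ≤ m
    · rw [if_neg (by omega), if_pos h]
      simp [List.take_succ_cons, ih]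
    · rw [if_pos (by omega), if_neg h]
      simp

-- every entry of prefixAcc is ≥ the starting total
theorem prefixAcc_lower (chunks : List String) (t : Int) :
    ∀ x ∈ prefixAcc chunks t, t ≤ x := by
  induction chunks generalizing t with
  | nil => simp [prefixAcc]
  | cons c rest ih =>
    intro x hx
    simp only [prefixAcc, List.mem_cons] at hx
    have hlen : (0 : Int) ≤ (PySem.Str.len c : Int) := Int.natCast_nonneg _
    rcases hx with rfl | hx
    · omega
    · have := ih (t + (PySem.Str.len c : Int)) x hx; omega

theorem prefixAcc_pairwise (chunks : List String) (t : Int) :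
    (prefixAcc chunks t).Pairwise (· ≤ ·) := by
  induction chunks generalizing t with
  | nil => simp [prefixAcc]
  | cons c rest ih =>
    simp only [prefixAcc, List.pairwise_cons]
    exact ⟨fun x hx => prefixAcc_lower _ _ x hx, ih _⟩

theorem prefixAcc_mono (chunks : List String) (t : Int) :
    ∀ i j, i ≤ j → j < (prefixAcc chunks t).length →
      (prefixAcc chunks t).getD i 0 ≤ (prefixAcc chunks t).getD j 0 := by
  intro i j hij hj
  rcases Nat.lt_or_ge i j with h | h
  · have := (List.pairwise_iff_getElem.mp (prefixAcc_pairwise chunks t)) i j (by omega) hj h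
    rw [List.getD_eq_getElem _ _ (by omega), List.getD_eq_getElem _ _ hj]
    exact this
  · have : i = j := by omega
    subst this; exact le_refl _

-- binary-search correctness on a monotone table
theorem bsearchGo_spec (l : List Int) (m : Int)
    (mono : ∀ i j, i ≤ j → j < l.length → l.getD i 0 ≤ l.getD j 0) :
    ∀ fuel lo hi, hi - lo ≤ fuel → hi ≤ l.length → lo ≤ hi →
      (∀ i, i < lo → l.getD i 0 ≤ m) →
      (∀ i, hi ≤ i → i < l.length → ¬ l.getD i 0 ≤ m) →
      (∀ i, i < bsearchGo l m fuel lo hi → l.getD i 0 ≤ m) ∧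
        bsearchGo l m fuel lo hi ≤ l.length ∧
        (∀ i, bsearchGo l m fuel lo hi ≤ i → i < l.length → ¬ l.getD i 0 ≤ m) := by
  intro fuel
  induction fuel with
  | zero =>
    intro lo hi hfuel hle hlh Hlo Hhi
    have : lo = hi := by omega
    subst this
    simp only [bsearchGo]
    exact ⟨Hlo, by omega, fun i hi' hi'' => Hhi i (by omega) hi''⟩
  | succ fuel ih =>
    intro lo hi hfuel hle hlh Hlo Hhi
    rw [bsearchGo]
    by_cases h : lo < hi
    · rw [if_pos h]
      by_cases hmid : l.getD ((lo + hi) / 2) 0 ≤ m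
      · rw [if_pos hmid]
        exact ih ((lo + hi) / 2 + 1) hi (by omega) hle (by omega)
          (fun i hi' => (mono i ((lo + hi) / 2) (by omega) (by omega)).trans hmid)
          Hhi
      · rw [if_neg hmid]
        exact ih lo ((lo + hi) / 2) (by omega) (by omega) (by omega) Hlo
          (fun i hi' hi'' hle' => hmid ((mono ((lo + hi) / 2) i hi' hi'').trans hle'))
    · rw [if_neg h]
      exact ⟨Hlo, by omega, fun i hi' hi'' => Hhi i (by omega) hi''⟩

-- the takeWhile cut point satisfies the same spec
theorem takeWhile_cut (l : List Int) (m : Int) :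
    (∀ i, i < (l.takeWhile (fun x => x ≤ m)).length → l.getD i 0 ≤ m) ∧
      (l.takeWhile (fun x => x ≤ m)).length ≤ l.length ∧
      ((l.takeWhile (fun x => x ≤ m)).length < l.length →
        ¬ l.getD (l.takeWhile (fun x => x ≤ m)).length 0 ≤ m) := by
  induction l with
  | nil => simp
  | cons a l ih =>
    by_cases h : a ≤ m
    · simp only [List.takeWhile_cons, decide_eq_true_eq, if_pos h, List.length_cons]
      refine ⟨fun i hi => ?_, by simpa using ih.2.1, fun hlt => ?_⟩
      · cases i with
        | zero => simpa using h
        | succ i => exact ih.1 i (by simpa using hi)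
      · simpa using ih.2.2 (by simpa using hlt)
    · simp only [List.takeWhile_cons, decide_eq_true_eq, if_neg h]
      exact ⟨by simp, by simp, fun _ => by simpa using h⟩

-- uniqueness of the cut point
theorem cut_unique (l : List Int) (m : Int) (k1 k2 : Nat)
    (h1a : ∀ i, i < k1 → l.getD i 0 ≤ m) (h1b : k1 ≤ l.length)
    (h1c : ∀ i, k1 ≤ i → i < l.length → ¬ l.getD i 0 ≤ m)
    (h2a : ∀ i, i < k2 → l.getD i 0 ≤ m) (h2b : k2 ≤ l.length)
    (h2c : k2 < l.length → ¬ l.getD k2 0 ≤ m) : k1 = k2 := by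
  rcases Nat.lt_trichotomy k1 k2 with h | h | h
  · exact absurd (h2a k1 h) (h1c k1 (le_refl _) (by omega))
  · exact h
  · exact absurd (h1a k2 h) (h2c (by omega))


-- ===== VERDICT (by name: the statement is the Claim_ definition above) =====
theorem limit_context_spec : Claim_equal_limit_context := by
  intro chunks max_chars _
  unfold Spec_limit_context limit_context limit_context_alt
  have key : bsearchB (prefixAcc chunks 0) max_chars 0 (prefixAcc chunks 0).length =
      ((prefixAcc chunks 0).takeWhile (fun x => x ≤ max_chars)).length := by
    obtain ⟨b1, b2, b3⟩ := bsearchGo_spec (prefixAcc chunks 0) max_chars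
      (prefixAcc_mono chunks 0) ((prefixAcc chunks 0).length - 0) 0 (prefixAcc chunks 0).length
      (le_refl _) (le_refl _) (Nat.zero_le _) (by omega) (by omega)
    obtain ⟨t1, t2, t3⟩ := takeWhile_cut (prefixAcc chunks 0) max_chars
    exact cut_unique (prefixAcc chunks 0) max_chars _ _ b1 b2 b3 t1 t2 t3
  show PySem.Str.join "\n\n" (limitLoopA max_chars chunks 0) =
    PySem.Str.join "\n\n"
      (chunks.take (bsearchB (prefixAcc chunks 0) max_chars 0 (prefixAcc chunks 0).length))
  rw [limitLoopA_eq_take, key]
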